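-- pv_equiv track=rewrite | github.com/miliar/Code_Jam_Webscraper | solutions_python/Problem_138/1741.py | willNaomiWin
-- ===== SOURCE A (Python) =====
-- def willNaomiWin(values, minVal):
--     #returns the minimum value in the list 'values' greater than minVal
--     #if such a value does not exist, return the smallest value in minVal (optimal)
--     inList = min(values)
--     smallestGreaterThan = -1
--     for value in values:
--         if value > minVal and (value < smallestGreaterThan or smallestGreaterThan == -1):
--             smallestGreaterThan = value
--     if smallestGreaterThan == -1:
--         return False
--     return True
-- ===== SOURCE B (Python) =====
-- def willNaomiWin(values, minVal):
--     # True iff some value exceeds minVal; max() raises on [] exactly as A's min() does.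
--     return max(values) > minVal
-- ===== Notes on version B (the rewrite author's own statement) =====
-- stated objective: simpler
-- what changed: Replaced the sentinel-based min-greater-than loop plus -1 test with the single expression max(values) > minVal.
-- intended difference: On nonempty lists where the elements greater than minVal all lie >= -1 and the last of them is -1 (e.g. ([3,-1],-5)), A's -1 sentinel is clobbered and A returns False although a value exceeds minVal; B returns True, which is the intended answer to 'does any value exceed minVal'. — e.g. on willNaomiWin([3, -1], -5): A returns false, B returns true
import Mathlib
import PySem

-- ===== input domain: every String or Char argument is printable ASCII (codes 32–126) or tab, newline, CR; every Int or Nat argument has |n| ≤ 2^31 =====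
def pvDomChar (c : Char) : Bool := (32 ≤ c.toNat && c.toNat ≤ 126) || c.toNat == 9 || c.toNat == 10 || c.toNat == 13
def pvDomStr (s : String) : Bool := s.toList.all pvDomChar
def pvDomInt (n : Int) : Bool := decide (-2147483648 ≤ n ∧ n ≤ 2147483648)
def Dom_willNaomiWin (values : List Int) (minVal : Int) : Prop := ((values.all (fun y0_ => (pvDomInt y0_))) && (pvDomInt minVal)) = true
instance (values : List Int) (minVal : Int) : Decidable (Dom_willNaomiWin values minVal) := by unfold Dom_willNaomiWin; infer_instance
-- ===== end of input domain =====

-- B replaces A's sentinel-based min-greater-than loop with the single test max(values) > minVal (simpler);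
-- equivalence is about the return value; on inputs described by D_ below A's sentinel misfires and B is right.

-- ===== PORT A =====
-- Literal transliteration of A: min(values) is computed (and raises on []); the -1-sentinel loop; final test.
def willNaomiWin (values : List Int) (minVal : Int) : Bool :=
  match PySem.List.min? values (fun x => x) with
  | none => false  -- Python: min([]) raises ValueError; excluded by Pre_willNaomiWin
  | some _inList =>
    let smallestGreaterThan :=
      values.foldl
        (fun s value => if value > minVal ∧ (value < s ∨ s = -1) then value else s)
        (-1)
    if smallestGreaterThan = -1 then false else true

-- ===== PORT B =====
def willNaomiWin_alt (values : List Int) (minVal : Int) : Bool :=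
  match PySem.List.max? values (fun x => x) with
  | none => false  -- Python: max([]) raises ValueError; excluded by Pre_willNaomiWin
  | some m => decide (m > minVal)

-- ===== PRECONDITION & SPEC =====
-- Python's min()/max() raise ValueError on the empty list.
def Pre_willNaomiWin (values : List Int) (minVal : Int) : Prop := values ≠ []
instance (values : List Int) (minVal : Int) : Decidable (Pre_willNaomiWin values minVal) := by unfold Pre_willNaomiWin; infer_instance
def pvWitness_willNaomiWin : List Int × Int := ([1, 5, 3], 2)

-- On nonempty lists whose elements greater than minVal all lie ≥ -1 with the last of them equal to -1,
-- A's -1 sentinel is clobbered and A returns False though a value exceeds minVal; B returns True, the intended answer.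
def D_willNaomiWin (values : List Int) (minVal : Int) : Prop :=
  (values.filter (fun v => minVal < v)).getLast? = some (-1) ∧
  ∀ v ∈ values, minVal < v → -1 ≤ v
instance (values : List Int) (minVal : Int) : Decidable (D_willNaomiWin values minVal) := by unfold D_willNaomiWin; infer_instance

def Spec_willNaomiWin (values : List Int) (minVal : Int) (out : Bool) : Prop :=
  ¬ D_willNaomiWin values minVal → out = willNaomiWin_alt values minVal
instance (values : List Int) (minVal : Int) (out : Bool) : Decidable (Spec_willNaomiWin values minVal out) := by unfold Spec_willNaomiWin; infer_instance

def pvDiffWitness_willNaomiWin : List Int × Int := ([3, -1], -5)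
def pvDiffWitnessOut_willNaomiWin : Bool × Bool := (false, true)

-- ===== CLAIM (what is proved, stated in full; the proofs are below) =====
def Claim_unchanged_willNaomiWin : Prop := ∀ (values : List Int) (minVal : Int), Dom_willNaomiWin values minVal → Pre_willNaomiWin values minVal → Spec_willNaomiWin values minVal (willNaomiWin values minVal)
def Claim_changed_willNaomiWin : Prop := Dom_willNaomiWin (pvDiffWitness_willNaomiWin.1) (pvDiffWitness_willNaomiWin.2) ∧ Pre_willNaomiWin (pvDiffWitness_willNaomiWin.1) (pvDiffWitness_willNaomiWin.2) ∧ D_willNaomiWin (pvDiffWitness_willNaomiWin.1) (pvDiffWitness_willNaomiWin.2) ∧ willNaomiWin (pvDiffWitness_willNaomiWin.1) (pvDiffWitness_willNaomiWin.2) = pvDiffWitnessOut_willNaomiWin.1 ∧ willNaomiWin_alt (pvDiffWitness_willNaomiWin.1) (pvDiffWitness_willNaomiWin.2) = pvDiffWitnessOut_willNaomiWin.2 ∧ pvDiffWitnessOut_willNaomiWin.1 ≠ pvDiffWitnessOut_willNaomiWin.2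
def Claim_exact_willNaomiWin : Prop := ∀ (values : List Int) (minVal : Int), Dom_willNaomiWin values minVal → Pre_willNaomiWin values minVal → D_willNaomiWin values minVal → willNaomiWin values minVal ≠ willNaomiWin_alt values minVal

-- ===== LEMMAS AND PROOFS =====

-- A's loop restricted to the elements > minVal
def pvStep (s v : Int) : Int := if v < s ∨ s = -1 then v else s

lemma foldl_filter_step (values : List Int) (minVal : Int) (s : Int) :
    values.foldl (fun s value => if value > minVal ∧ (value < s ∨ s = -1) then value else s) s
    = (values.filter (fun v => minVal < v)).foldl pvStep s := by
  induction values generalizing s with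
  | nil => rfl
  | cons v t ih =>
    by_cases h : minVal < v
    · simp [h, List.foldl_cons, pvStep, ih]
    · have : ¬ (v > minVal ∧ (v < s ∨ s = -1)) := fun hc => h hc.1
      simp [h, List.foldl_cons, ih]

lemma foldl_step_lt (G : List Int) (s : Int) (hs : s < -1) :
    G.foldl pvStep s < -1 := by
  induction G generalizing s with
  | nil => exact hs
  | cons v t ih =>
    simp only [List.foldl_cons, pvStep]
    split_ifs with h
    · rcases h with h | h
      · exact ih v (lt_trans h hs)
      · omega
    · exact ih s hs

-- characterization of when A's loop ends with the sentinel, for start states ≥ -1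
lemma foldl_step_eq_neg_one (G : List Int) (s : Int) (hs : -1 ≤ s) :
    G.foldl pvStep s = -1 ↔
      ((G = [] ∧ s = -1) ∨ (G.getLast? = some (-1) ∧ ∀ v ∈ G, -1 ≤ v)) := by
  induction G generalizing s with
  | nil => simp
  | cons v t ih =>
    simp only [List.foldl_cons]
    by_cases hv : -1 ≤ v
    · have hnew : -1 ≤ pvStep s v := by unfold pvStep; split_ifs <;> omega
      rw [ih _ hnew]
      cases t with
      | nil =>
        have hps : pvStep s v = -1 ↔ v = -1 := by unfold pvStep; split_ifs <;> omega
        simp [hps, hv]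
      | cons w u =>
        have hlast : (v :: w :: u).getLast? = (w :: u).getLast? := by
          simp [List.getLast?_cons_cons]
        constructor
        · rintro (⟨h, _⟩ | ⟨h1, h2⟩)
          · simp at h
          · right
            refine ⟨by rw [hlast]; exact h1, ?_⟩
            intro x hx
            rcases List.mem_cons.mp hx with rfl | hx
            · exact hv
            · exact h2 x hx
        · rintro (⟨h, _⟩ | ⟨h1, h2⟩)
          · simp at h
          · right
            refine ⟨by rwa [hlast] at h1, fun x hx => h2 x (List.mem_cons_of_mem _ hx)⟩
    · -- v < -1: the new state is < -1, so the fold never returns to -1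
      have hnew : pvStep s v < -1 := by unfold pvStep; split_ifs <;> omega
      have hne : t.foldl pvStep (pvStep s v) < -1 := foldl_step_lt t _ hnew
      constructor
      · intro h; omega
      · rintro (⟨h, _⟩ | ⟨_, h2⟩)
        · simp at h
        · exact absurd (h2 v (List.mem_cons_self)) (by omega)

lemma filter_nil_iff (values : List Int) (minVal : Int) :
    values.filter (fun v => minVal < v) = [] ↔ ∀ v ∈ values, ¬ minVal < v := by
  simp [List.filter_eq_nil_iff]

lemma altB_true_iff (values : List Int) (minVal : Int) (h : values ≠ []) :
    willNaomiWin_alt values minVal = true ↔ ∃ v ∈ values, minVal < v := by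
  unfold willNaomiWin_alt
  obtain ⟨m, hm⟩ : ∃ m, PySem.List.max? values (fun x => x) = some m := by
    cases hmx : PySem.List.max? values (fun x => x) with
    | none => exact absurd ((PySem.List.max?_eq_none_iff values (fun x => x)).mp hmx) h
    | some m => exact ⟨m, rfl⟩
  rw [hm]
  simp only [decide_eq_true_eq]
  constructor
  · intro hlt; exact ⟨m, PySem.List.max?_mem hm, hlt⟩
  · rintro ⟨v, hv, hlt⟩
    exact lt_of_lt_of_le hlt (PySem.List.max?_isMax hm v hv)

lemma A_eq_sentinel (values : List Int) (minVal : Int) (h : values ≠ []) :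
    willNaomiWin values minVal =
      !decide ((values.filter (fun v => minVal < v)).foldl pvStep (-1) = -1) := by
  unfold willNaomiWin
  obtain ⟨m, hm⟩ : ∃ m, PySem.List.min? values (fun x => x) = some m := by
    cases hmx : PySem.List.min? values (fun x => x) with
    | none => exact absurd ((PySem.List.min?_eq_none_iff values (fun x => x)).mp hmx) h
    | some m => exact ⟨m, rfl⟩
  rw [hm]
  simp only [foldl_filter_step]
  split_ifs with hs <;> simp [hs]

theorem willNaomiWin_agree (values : List Int) (minVal : Int)
    (hpre : values ≠ []) (hD : ¬ D_willNaomiWin values minVal) :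
    willNaomiWin values minVal = willNaomiWin_alt values minVal := by
  set G := values.filter (fun v => minVal < v) with hG
  have hchar := foldl_step_eq_neg_one G (-1) (le_refl _)
  rw [A_eq_sentinel values minVal hpre, ← hG]
  by_cases hGnil : G = []
  · have hnone : ∀ v ∈ values, ¬ minVal < v := (filter_nil_iff values minVal).mp (hG ▸ hGnil)
    have hB : willNaomiWin_alt values minVal = false := by
      rw [← Bool.not_eq_true, altB_true_iff values minVal hpre]
      rintro ⟨v, hv, hlt⟩; exact hnone v hv hlt
    rw [hB]
    have : G.foldl pvStep (-1) = -1 := hchar.mpr (Or.inl ⟨hGnil, rfl⟩)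
    simp [this]
  · -- G nonempty: ¬D rules out the sentinel-clobbering pattern, so A = true; B = true too
    have hex : ∃ v ∈ values, minVal < v := by
      obtain ⟨v, hv⟩ := List.exists_mem_of_ne_nil G hGnil
      exact ⟨v, (List.mem_filter.mp (hG ▸ hv)).1, by
        have := (List.mem_filter.mp (hG ▸ hv)).2; simpa using this⟩
    have hB : willNaomiWin_alt values minVal = true := (altB_true_iff values minVal hpre).mpr hex
    have hne : G.foldl pvStep (-1) ≠ -1 := by
      intro hc
      rcases hchar.mp hc with ⟨h, _⟩ | ⟨h1, h2⟩
      · exact hGnil h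
      · exact hD ⟨hG ▸ h1, fun v hv hlt => h2 v (hG ▸ List.mem_filter.mpr ⟨hv, by simpa using hlt⟩)⟩
    simp [hB, hne]

theorem willNaomiWin_differ (values : List Int) (minVal : Int)
    (hpre : values ≠ []) (hD : D_willNaomiWin values minVal) :
    willNaomiWin values minVal ≠ willNaomiWin_alt values minVal := by
  obtain ⟨h1, h2⟩ := hD
  set G := values.filter (fun v => minVal < v) with hG
  have hGnil : G ≠ [] := by intro hc; rw [hc] at h1; simp at h1
  have hex : ∃ v ∈ values, minVal < v := by
    obtain ⟨v, hv⟩ := List.exists_mem_of_ne_nil G hGnil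
    exact ⟨v, (List.mem_filter.mp (hG ▸ hv)).1, by
      have := (List.mem_filter.mp (hG ▸ hv)).2; simpa using this⟩
  have hB : willNaomiWin_alt values minVal = true := (altB_true_iff values minVal hpre).mpr hex
  have hall : ∀ v ∈ G, -1 ≤ v := by
    intro v hv
    have hm := List.mem_filter.mp (hG ▸ hv)
    exact h2 v hm.1 (by simpa using hm.2)
  have hA : G.foldl pvStep (-1) = -1 :=
    (foldl_step_eq_neg_one G (-1) (le_refl _)).mpr (Or.inr ⟨h1, hall⟩)
  rw [A_eq_sentinel values minVal hpre, ← hG, hB]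
  simp [hA]

-- ===== VERDICT (by name: the statement is the Claim_ definition above) =====
theorem willNaomiWin_spec : Claim_unchanged_willNaomiWin := by
  intro values minVal _ hpre hD
  exact willNaomiWin_agree values minVal hpre hD

theorem willNaomiWin_changed : Claim_changed_willNaomiWin := by
  unfold Claim_changed_willNaomiWin; decide

theorem willNaomiWin_tight : Claim_exact_willNaomiWin := by
  intro values minVal _ hpre hD
  exact willNaomiWin_differ values minVal hpre hD
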